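-- pv_equiv track=rewrite | github.com/ryanescue/PDF-Tool-Kit | pdf_toolkit/services/pdf_splitter.py | _sanitize_split_points
-- ===== SOURCE A (Python) =====
-- from typing import List, Sequence, Tuple #pagecount and func signitures
--
-- def _sanitize_split_points(points: Sequence[int], total_pages: int) -> List[int]: #cleans user input split marker for Split_pdf
--     valid_points: List[int] = []
--     seen = set()
--     for point in points: #checks all points user provides
--         if not isinstance(point, int): #skips non int
--             continue
--         if point <= 1 or point > total_pages: #cant split at 1 or last page
--             continue
--         if point in seen:
--             continue
--         seen.add(point)
--         valid_points.append(point)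
--     valid_points.sort()
--     return valid_points
-- ===== SOURCE B (Python) =====
-- from typing import List, Sequence
--
--
-- def _sanitize_split_points(points: Sequence[int], total_pages: int) -> List[int]:
--     # Sort first, then one scan: out-of-range values are dropped and duplicates
--     # (now adjacent) are skipped by comparing with the last emitted value.
--     result: List[int] = []
--     for point in sorted(points):
--         if 1 < point <= total_pages and (not result or result[-1] != point):
--             result.append(point)
--     return result
-- ===== Notes on version B (the rewrite author's own statement) =====
-- stated objective: alternative
-- what changed: B sorts the input first and then does a single linear scan that drops out-of-range values and skips duplicates by comparing with the last emitted element, instead of A's seen-set insertion-order dedup loop followed by a sort.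
import Mathlib
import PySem

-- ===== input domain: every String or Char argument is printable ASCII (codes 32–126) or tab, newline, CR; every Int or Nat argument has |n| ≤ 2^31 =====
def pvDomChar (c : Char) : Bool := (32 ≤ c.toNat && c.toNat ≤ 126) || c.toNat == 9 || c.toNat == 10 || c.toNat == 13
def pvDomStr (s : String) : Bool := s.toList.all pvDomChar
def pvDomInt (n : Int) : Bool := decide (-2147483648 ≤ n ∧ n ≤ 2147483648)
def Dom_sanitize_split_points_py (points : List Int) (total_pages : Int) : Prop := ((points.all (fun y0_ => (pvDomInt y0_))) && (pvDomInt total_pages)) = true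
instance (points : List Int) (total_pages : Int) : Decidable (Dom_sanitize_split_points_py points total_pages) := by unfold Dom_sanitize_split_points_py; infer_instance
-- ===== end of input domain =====

-- B sorts first and removes out-of-range values and (now adjacent) duplicates in one
-- scan, instead of A's seen-set insertion-order dedup loop followed by a sort (objective: alternative).

-- ===== PORT A =====
-- loop state: (valid_points, seen); `isinstance(point, int)` is always true for Int inputs
def sanitize_split_points_py (points : List Int) (total_pages : Int) : List Int :=
  let st := points.foldl
    (fun (st : List Int × PySem.Set Int) point =>
      if point ≤ 1 ∨ point > total_pages then st            -- cant split at 1 or last page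
      else if PySem.Set.contains st.2 point then st          -- point in seen
      else (st.1 ++ [point], PySem.Set.add st.2 point))
    ([], PySem.Set.empty)
  PySem.List.sorted st.1 (fun x => x) false                  -- valid_points.sort()

-- ===== PORT B =====
-- `result[-1] != point` on a non-empty result is `result.getLast? ≠ some point`
def sanitize_split_points_py_alt (points : List Int) (total_pages : Int) : List Int :=
  (PySem.List.sorted points (fun x => x) false).foldl
    (fun result point =>
      if 1 < point ∧ point ≤ total_pages ∧ (result = [] ∨ result.getLast? ≠ some point)
      then result ++ [point] else result) []

-- ===== PRECONDITION & SPEC =====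
def Spec_sanitize_split_points_py (points : List Int) (total_pages : Int) (out : List Int) : Prop := out = sanitize_split_points_py_alt points total_pages
instance (points : List Int) (total_pages : Int) (out : List Int) : Decidable (Spec_sanitize_split_points_py points total_pages out) := by unfold Spec_sanitize_split_points_py; infer_instance

-- ===== CLAIM (what is proved, stated in full; the proofs are below) =====
def Claim_equal_sanitize_split_points_py : Prop := ∀ (points : List Int) (total_pages : Int), Dom_sanitize_split_points_py points total_pages → Spec_sanitize_split_points_py points total_pages (sanitize_split_points_py points total_pages)

-- ===== LEMMAS AND PROOFS =====

-- A's loop keeps seen = valid_points and computes Set.add-folding over the filtered list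
theorem pvA_fold (total_pages : Int) (pts : List Int) : ∀ (v : List Int),
    (pts.foldl
      (fun (st : List Int × PySem.Set Int) point =>
        if point ≤ 1 ∨ point > total_pages then st
        else if PySem.Set.contains st.2 point then st
        else (st.1 ++ [point], PySem.Set.add st.2 point))
      (v, v)).1
    = (pts.filter (fun p => decide (1 < p ∧ p ≤ total_pages))).foldl PySem.Set.add v := by
  induction pts with
  | nil => intro v; rfl
  | cons p rest ih =>
    intro v
    by_cases hg : p ≤ 1 ∨ p > total_pages
    · have hf : (decide (1 < p ∧ p ≤ total_pages)) = false := by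
        simp only [decide_eq_false_iff_not]; omega
      simp only [List.foldl_cons, List.filter_cons, hf, if_pos hg]
      exact ih v
    · have hf : (decide (1 < p ∧ p ≤ total_pages)) = true := by
        simp only [decide_eq_true_eq]; omega
      simp only [List.foldl_cons, List.filter_cons, hf, if_neg hg, if_true]
      by_cases hc : PySem.Set.contains v p = true
      · have hm : p ∈ v := by simpa [PySem.Set.contains] using hc
        have hadd : PySem.Set.add v p = v := by
          simp [PySem.Set.add, PySem.Set.contains, hm]
        simp only [hc, if_true, hadd]
        exact ih v
      · have hm : p ∉ v := by simpa [PySem.Set.contains] using hc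
        have hadd : PySem.Set.add v p = v ++ [p] := by
          simp [PySem.Set.add, PySem.Set.contains, hm]
        simp only [hc, if_false, Bool.false_eq_true, hadd]
        have := ih (v ++ [p])
        simpa [hadd] using this

-- every member of a strictly increasing list is ≤ its last element
theorem pvLe_getLast (acc : List Int) (hp : acc.Pairwise (· < ·)) :
    ∀ a ∈ acc, ∀ l, acc.getLast? = some l → a ≤ l := by
  induction acc with
  | nil => intro a ha; simp at ha
  | cons b t ih =>
    intro a ha l hl
    cases t with
    | nil =>
      simp at hl ha; omega
    | cons c t' =>
      rw [List.getLast?_cons_cons] at hl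
      have hlt : ∀ x ∈ c :: t', b < x := (List.pairwise_cons.mp hp).1
      have hlm : l ∈ c :: t' := List.mem_of_getLast? hl
      rcases List.mem_cons.mp ha with rfl | ha'
      · exact le_of_lt (hlt l hlm)
      · exact ih (List.pairwise_cons.mp hp).2 a ha' l hl

-- B's scan over a ≤-sorted list: result strictly increasing, membership = valid members
theorem pvB_fold (total_pages : Int) (S : List Int) : ∀ (acc : List Int),
    S.Pairwise (· ≤ ·) → acc.Pairwise (· < ·) → (∀ a ∈ acc, ∀ s ∈ S, a ≤ s) →
    (S.foldl
      (fun result point =>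
        if 1 < point ∧ point ≤ total_pages ∧ (result = [] ∨ result.getLast? ≠ some point)
        then result ++ [point] else result) acc).Pairwise (· < ·) ∧
    (∀ x, x ∈ (S.foldl
      (fun result point =>
        if 1 < point ∧ point ≤ total_pages ∧ (result = [] ∨ result.getLast? ≠ some point)
        then result ++ [point] else result) acc)
      ↔ x ∈ acc ∨ (x ∈ S ∧ 1 < x ∧ x ≤ total_pages)) := by
  induction S with
  | nil => intro acc _ hacc _; simpa using hacc
  | cons p rest ih =>
    intro acc hS hacc hle
    have hps : ∀ s ∈ rest, p ≤ s := (List.pairwise_cons.mp hS).1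
    have hrest : rest.Pairwise (· ≤ ·) := (List.pairwise_cons.mp hS).2
    by_cases hc : 1 < p ∧ p ≤ total_pages ∧ (acc = [] ∨ acc.getLast? ≠ some p)
    · -- append p
      have haccp : ∀ a ∈ acc, a < p := by
        intro a ha
        have h1 : a ≤ p := hle a ha p (List.mem_cons_self ..)
        rcases lt_or_eq_of_le h1 with h | h
        · exact h
        · exfalso
          subst h
          rcases hc.2.2 with hnil | hne
          · rw [hnil] at ha; simp at ha
          · have : acc.getLast? ≠ none := by
              intro h0
              have : acc = [] := List.getLast?_eq_none_iff.mp h0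
              rw [this] at ha; simp at ha
            rcases Option.ne_none_iff_exists'.mp this with ⟨l, hl⟩
            have hlm : l ∈ acc := List.mem_of_getLast? hl
            have h2 : l ≤ a := hle l hlm a (List.mem_cons_self ..)
            have h3 : a ≤ l := pvLe_getLast acc hacc a ha l hl
            have : l = a := le_antisymm h2 h3
            exact hne (by rw [hl, this])
      have hacc' : (acc ++ [p]).Pairwise (· < ·) := by
        rw [List.pairwise_append]
        exact ⟨hacc, List.pairwise_singleton _ _, by
          intro a ha b hb
          simp at hb; subst hb; exact haccp a ha⟩
      have hle' : ∀ a ∈ acc ++ [p], ∀ s ∈ rest, a ≤ s := by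
        intro a ha s hs
        rcases List.mem_append.mp ha with ha' | ha'
        · exact hle a ha' s (List.mem_cons_of_mem _ hs)
        · simp at ha'; subst ha'; exact hps s hs
      have := ih (acc ++ [p]) hrest hacc' hle'
      refine ⟨?_, ?_⟩
      · simpa [List.foldl_cons, if_pos hc] using this.1
      · intro x
        rw [List.foldl_cons, if_pos hc, this.2 x]
        constructor
        · rintro (hx | hx)
          · rcases List.mem_append.mp hx with h | h
            · exact Or.inl h
            · simp at h; subst h
              exact Or.inr ⟨List.mem_cons_self .., hc.1, hc.2.1⟩
          · exact Or.inr ⟨List.mem_cons_of_mem _ hx.1, hx.2⟩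
        · rintro (hx | ⟨hx1, hx2⟩)
          · exact Or.inl (List.mem_append.mpr (Or.inl hx))
          · rcases List.mem_cons.mp hx1 with rfl | h
            · exact Or.inl (List.mem_append.mpr (Or.inr (by simp)))
            · exact Or.inr ⟨h, hx2⟩
    · -- skip p
      have hle' : ∀ a ∈ acc, ∀ s ∈ rest, a ≤ s := fun a ha s hs =>
        hle a ha s (List.mem_cons_of_mem _ hs)
      have := ih acc hrest hacc hle'
      refine ⟨?_, ?_⟩
      · simpa [List.foldl_cons, if_neg hc] using this.1
      · intro x
        rw [List.foldl_cons, if_neg hc, this.2 x]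
        constructor
        · rintro (hx | hx)
          · exact Or.inl hx
          · exact Or.inr ⟨List.mem_cons_of_mem _ hx.1, hx.2⟩
        · rintro (hx | ⟨hx1, hx2⟩)
          · exact Or.inl hx
          · rcases List.mem_cons.mp hx1 with rfl | h
            · -- p valid but skipped: last of acc must be p, so p ∈ acc
              push Not at hc
              obtain ⟨-, hl⟩ := hc hx2.1 hx2.2
              exact Or.inl (List.mem_of_getLast? hl)
            · exact Or.inr ⟨h, hx2⟩

-- two strictly increasing lists with the same members are equal
theorem pvEqOfSorted (l1 : List Int) : ∀ (l2 : List Int), l1.Pairwise (· < ·) → l2.Pairwise (· < ·) →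
    (∀ x, x ∈ l1 ↔ x ∈ l2) → l1 = l2 := by
  induction l1 with
  | nil =>
    intro l2 h1 h2 hm
    cases l2 with
    | nil => rfl
    | cons b t => exact absurd ((hm b).mpr (List.mem_cons_self ..)) (by simp)
  | cons a t ih =>
    intro l2 h1 h2 hm
    cases l2 with
    | nil => exact absurd ((hm a).mp (List.mem_cons_self ..)) (by simp)
    | cons b t2 =>
      have hab : a = b := by
        have ha2 : a ∈ b :: t2 := (hm a).mp (List.mem_cons_self ..)
        have hb1 : b ∈ a :: t := (hm b).mpr (List.mem_cons_self ..)
        rcases List.mem_cons.mp ha2 with h | h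
        · exact h
        · have hba : b < a := ((List.pairwise_cons.mp h2).1) a h
          rcases List.mem_cons.mp hb1 with h' | h'
          · omega
          · have : a < b := ((List.pairwise_cons.mp h1).1) b h'
            omega
      subst hab
      have ht : t = t2 := by
        apply ih t2 (List.pairwise_cons.mp h1).2 (List.pairwise_cons.mp h2).2
        intro x
        constructor
        · intro hx
          have hax : a < x := ((List.pairwise_cons.mp h1).1) x hx
          rcases List.mem_cons.mp ((hm x).mp (List.mem_cons_of_mem _ hx)) with h | h
          · omega
          · exact h
        · intro hx
          have hax : a < x := ((List.pairwise_cons.mp h2).1) x hx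
          rcases List.mem_cons.mp ((hm x).mpr (List.mem_cons_of_mem _ hx)) with h | h
          · omega
          · exact h
      rw [ht]

-- ===== VERDICT (by name: the statement is the Claim_ definition above) =====
theorem sanitize_split_points_py_spec : Claim_equal_sanitize_split_points_py := by
  intro points total_pages _
  unfold Spec_sanitize_split_points_py sanitize_split_points_py sanitize_split_points_py_alt
  have hA : (points.foldl
      (fun (st : List Int × PySem.Set Int) point =>
        if point ≤ 1 ∨ point > total_pages then st
        else if PySem.Set.contains st.2 point then st
        else (st.1 ++ [point], PySem.Set.add st.2 point))
      ([], PySem.Set.empty)).1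
      = PySem.Set.ofList (points.filter (fun p => decide (1 < p ∧ p ≤ total_pages))) :=
    pvA_fold total_pages points []
  simp only [hA]
  have hS : (PySem.List.sorted points (fun x => x) false).Pairwise (· ≤ ·) := by
    have := PySem.List.sorted_pairwise (xs := points) (key := fun x => x)
    simpa using this
  have hB := pvB_fold total_pages (PySem.List.sorted points (fun x => x) false) []
    hS (List.Pairwise.nil) (by intro a ha; simp at ha)
  apply pvEqOfSorted _ _
    (PySem.List.sorted_ofList_pairwise_lt
      (xs := points.filter (fun p => decide (1 < p ∧ p ≤ total_pages))))
    hB.1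
  · intro x
    rw [hB.2 x]
    have hmA : x ∈ PySem.List.sorted
        (PySem.Set.ofList (points.filter (fun p => decide (1 < p ∧ p ≤ total_pages))))
        (fun x => x) false ↔ x ∈ points ∧ 1 < x ∧ x ≤ total_pages := by
      rw [PySem.List.mem_sorted, PySem.Set.mem_ofList, List.mem_filter]
      simp
    have hmS : x ∈ PySem.List.sorted points (fun x => x) false ↔ x ∈ points :=
      PySem.List.mem_sorted points (fun x => x) false x
    rw [hmA]
    simp [hmS]
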